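-- pv_equiv track=rewrite | github.com/quangmta/3D-Model-Monocular-Vision | test_color.py | delta_update
-- ===== SOURCE A (Python) =====
-- def delta_update(delta,flag,mask):
--     maker = -1
--     delta_n = delta.copy()
--     for i in range(0,len(delta)):
--         if flag[i]==True:
--             if flag[i-1] ==False:
--                 maker = i
--             if maker>=10 and maker<=len(delta)-10:
--                 delta_n[i] = delta_n[maker]
--             else:
--                 delta_n[i] = 0
--     return delta_n
-- ===== SOURCE B (Python) =====
-- def delta_update(delta, flag, mask):
--     # Staged group-by rewrite: first group indices into maximal runs of equal
--     # flag value, then map each run to a whole output segment and concatenate.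
--     n = len(delta)
--     groups = []  # (flag value, start index, length) for each maximal run
--     for i in range(n):
--         if groups and groups[-1][0] == flag[i]:
--             v, s, l = groups[-1]
--             groups[-1] = (v, s, l + 1)
--         else:
--             groups.append((flag[i], i, 1))
--     out = []
--     for v, s, l in groups:
--         if v:
--             out.extend([delta[s] if 10 <= s <= n - 10 else 0] * l)
--         else:
--             out.extend(delta[s:s + l])
--     return out
-- ===== Notes on version B (the rewrite author's own statement) =====
-- stated objective: alternative
-- what changed: Replaced A's in-place pass with per-element assignments and a running 'maker' state by a staged group-by: one pass builds (value, start, length) triples for every maximal run of equal flag values, a second pass maps each run to a whole segment (a constant block for True runs, the original slice for False runs) and the output is the concatenation of those segments.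
import Mathlib
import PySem

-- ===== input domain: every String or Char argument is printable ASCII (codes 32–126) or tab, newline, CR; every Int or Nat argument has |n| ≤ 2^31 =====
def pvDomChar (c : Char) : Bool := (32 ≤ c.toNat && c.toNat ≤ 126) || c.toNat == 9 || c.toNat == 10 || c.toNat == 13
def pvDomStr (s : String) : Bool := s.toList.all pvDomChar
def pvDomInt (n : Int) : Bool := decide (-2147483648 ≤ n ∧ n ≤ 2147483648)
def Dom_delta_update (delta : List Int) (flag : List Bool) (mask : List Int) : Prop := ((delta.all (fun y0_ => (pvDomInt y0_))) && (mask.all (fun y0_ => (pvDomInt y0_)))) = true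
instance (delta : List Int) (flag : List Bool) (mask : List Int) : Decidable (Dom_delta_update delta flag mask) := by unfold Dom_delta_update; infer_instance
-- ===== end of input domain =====

-- B replaces A's in-place pass with its running 'maker' state by a staged group-by:
-- group indices into maximal runs of equal flag value, then map each run to a whole
-- output segment and concatenate (objective: alternative). 'mask' is unused by A and B.

-- ===== PORT A =====
def delta_update (delta : List Int) (flag : List Bool) (mask : List Int) : List Int :=
  ((List.range delta.length).foldl (fun (st : Int × List Int) (i : Nat) =>
    if (PySem.List.pyGet? flag (i : Int)).getD false then
      let maker : Int :=
        if (PySem.List.pyGet? flag ((i : Int) - 1)).getD false = false then (i : Int) else st.1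
      if 10 ≤ maker ∧ maker ≤ (delta.length : Int) - 10 then
        (maker, st.2.set i ((PySem.List.pyGet? st.2 maker).getD 0))
      else
        (maker, st.2.set i 0)
    else st) ((-1 : Int), delta)).2

-- ===== PORT B =====
-- flag[i] for an index i < len(delta) (the default only fires outside Pre_)
def pvFlag (flag : List Bool) (i : Nat) : Bool := flag.getD i false

-- stage 1 of Source B: (value, start, length) triples of the maximal runs of equal flag value
def pvGroups (flag : List Bool) (n : Nat) : List (Bool × Nat × Nat) :=
  (List.range n).foldl (fun (gs : List (Bool × Nat × Nat)) (i : Nat) =>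
    match gs.getLast? with
    | some g =>
      if g.1 = pvFlag flag i then gs.dropLast ++ [(g.1, g.2.1, g.2.2 + 1)]
      else gs ++ [(pvFlag flag i, i, 1)]
    | none => gs ++ [(pvFlag flag i, i, 1)]) []

-- stage 2 of Source B: one output segment per run
def pvSeg (delta : List Int) (g : Bool × Nat × Nat) : List Int :=
  if g.1 then
    List.replicate g.2.2
      (if 10 ≤ (g.2.1 : Int) ∧ (g.2.1 : Int) ≤ (delta.length : Int) - 10 then delta.getD g.2.1 0 else 0)
  else
    PySem.List.slice delta (some (g.2.1 : Int)) (some ((g.2.1 : Int) + (g.2.2 : Int)))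

def delta_update_alt (delta : List Int) (flag : List Bool) (mask : List Int) : List Int :=
  (pvGroups flag delta.length).foldl (fun out g => out ++ pvSeg delta g) []

-- ===== PRECONDITION & SPEC =====
-- Pre_ excludes exactly the inputs on which A raises IndexError (flag shorter than a
-- nonempty delta; B raises there too): Python reads flag[i] for every i < len(delta) and flag[-1].
def Pre_delta_update (delta : List Int) (flag : List Bool) (mask : List Int) : Prop :=
  delta = [] ∨ delta.length ≤ flag.length
instance (delta : List Int) (flag : List Bool) (mask : List Int) : Decidable (Pre_delta_update delta flag mask) := by unfold Pre_delta_update; infer_instance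

def pvWitness_delta_update : List Int × List Bool × List Int :=
  ([0, 1, 2], [true, false, true], [])

def Spec_delta_update (delta : List Int) (flag : List Bool) (mask : List Int) (out : List Int) : Prop := out = delta_update_alt delta flag mask
instance (delta : List Int) (flag : List Bool) (mask : List Int) (out : List Int) : Decidable (Spec_delta_update delta flag mask out) := by unfold Spec_delta_update; infer_instance

-- ===== CLAIM (what is proved, stated in full; the proofs are below) =====
def Claim_equal_delta_update : Prop := ∀ (delta : List Int) (flag : List Bool) (mask : List Int), Dom_delta_update delta flag mask → Pre_delta_update delta flag mask → Spec_delta_update delta flag mask (delta_update delta flag mask)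

-- ===== LEMMAS AND PROOFS =====

-- start of the maximal True-run containing j (0 for a run touching index 0)
def pvRunStart (flag : List Bool) : Nat → Nat
  | 0 => 0
  | i + 1 => if pvFlag flag i then pvRunStart flag i else i + 1

-- the single fill value for a run starting at s
def pvFill (delta : List Int) (s : Nat) : Int :=
  if 10 ≤ (s : Int) ∧ (s : Int) ≤ (delta.length : Int) - 10 then delta.getD s 0 else 0

-- the common pointwise description of the result
def pvOut (delta : List Int) (flag : List Bool) : List Int :=
  (List.range delta.length).map (fun j =>
    if pvFlag flag j then pvFill delta (pvRunStart flag j) else delta.getD j 0)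

theorem pvOut_length (delta : List Int) (flag : List Bool) :
    (pvOut delta flag).length = delta.length := by simp [pvOut]

theorem pvOut_getElem (delta : List Int) (flag : List Bool) (j : Nat) (hj : j < delta.length) :
    (pvOut delta flag)[j]'(by simpa [pvOut_length] using hj) =
      if pvFlag flag j then pvFill delta (pvRunStart flag j) else delta.getD j 0 := by
  simp [pvOut]

theorem pvRunStart_le (flag : List Bool) (j : Nat) : pvRunStart flag j ≤ j := by
  induction j with
  | zero => simp [pvRunStart]
  | succ i ih => rw [pvRunStart]; split <;> omega

theorem pvRunStart_fix (flag : List Bool) (j : Nat) (hj : pvFlag flag j = true) :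
    pvFlag flag (pvRunStart flag j) = true ∧
      pvRunStart flag (pvRunStart flag j) = pvRunStart flag j := by
  induction j with
  | zero => exact ⟨hj, rfl⟩
  | succ i ih =>
    rw [pvRunStart]
    by_cases hi : pvFlag flag i = true
    · rw [if_pos hi]; exact ih hi
    · rw [if_neg hi, pvRunStart, if_neg hi]
      exact ⟨hj, rfl⟩

theorem pvRunStart_succ_true (flag : List Bool) (i : Nat) (h : pvFlag flag i = true) :
    pvRunStart flag (i + 1) = pvRunStart flag i := by
  rw [pvRunStart, if_pos h]

theorem pvRunStart_succ_false (flag : List Bool) (i : Nat) (h : ¬ pvFlag flag i = true) :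
    pvRunStart flag (i + 1) = i + 1 := by
  rw [pvRunStart, if_neg h]

-- set at the frontier of a take/drop mixed list
theorem pv_step_set {α : Type} (M L : List α) (i : Nat) (hM : i < M.length) (hL : i < L.length)
    (v : α) (hv : M[i] = v) :
    (M.take i ++ L.drop i).set i v = M.take (i + 1) ++ L.drop (i + 1) := by
  have hlen : (M.take i).length = i := by simp; omega
  rw [List.set_append, if_neg (by omega)]
  have e1 : (L.drop i).set (i - (M.take i).length) v = v :: L.drop (i + 1) := by
    rw [hlen, Nat.sub_self, List.drop_eq_getElem_cons hL]
    rfl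
  rw [e1, List.take_add_one, List.getElem?_eq_getElem hM, hv]
  simp

theorem pv_step_skip {α : Type} (M L : List α) (i : Nat) (hM : i < M.length) (hL : i < L.length)
    (hv : M[i] = L[i]) :
    M.take i ++ L.drop i = M.take (i + 1) ++ L.drop (i + 1) := by
  rw [List.drop_eq_getElem_cons hL, List.take_add_one, List.getElem?_eq_getElem hM]
  simp [hv]

-- element of a mixed list left of the frontier
theorem pv_mixed_lt {α : Type} (M L : List α) (i s : Nat) (hs : s < i) (hM : i ≤ M.length) :
    (M.take i ++ L.drop i)[s]? = M[s]? := by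
  rw [List.getElem?_append_left (by simp; omega)]
  simp [hs]

-- element of a mixed list at the frontier
theorem pv_mixed_eq {α : Type} (M L : List α) (i : Nat) (hi : i ≤ M.length) (hL : i < L.length) :
    (M.take i ++ L.drop i)[i]? = L[i]? := by
  have hlen : (M.take i).length = i := by simp; omega
  rw [List.getElem?_append_right (by omega)]
  simp [hlen, List.getElem?_drop]

-- ===== A-side =====

theorem pvA_inv (delta : List Int) (flag : List Bool)
    (hpre : delta.length ≤ flag.length) :
    ∀ i, i ≤ delta.length →
      ∃ maker : Int,
        (List.range i).foldl (fun (st : Int × List Int) (i : Nat) =>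
          if (PySem.List.pyGet? flag (i : Int)).getD false then
            let maker : Int :=
              if (PySem.List.pyGet? flag ((i : Int) - 1)).getD false = false then (i : Int) else st.1
            if 10 ≤ maker ∧ maker ≤ (delta.length : Int) - 10 then
              (maker, st.2.set i ((PySem.List.pyGet? st.2 maker).getD 0))
            else
              (maker, st.2.set i 0)
          else st) ((-1 : Int), delta)
          = (maker, (pvOut delta flag).take i ++ delta.drop i)
        ∧ (i = 0 → maker = -1)
        ∧ (∀ i', i = i' + 1 → pvFlag flag i' = true →
            maker = (pvRunStart flag i' : Int) ∨
              (pvRunStart flag i' = 0 ∧ maker ≤ 0)) := by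
  intro i
  induction i with
  | zero =>
    intro _
    exact ⟨-1, by simp, fun _ => rfl, fun i' h => absurd h (by omega)⟩
  | succ i ih =>
    intro hle
    obtain ⟨maker, heq, h0, hmk⟩ := ih (by omega)
    have hi : i < delta.length := by omega
    have hiO : i < (pvOut delta flag).length := by rw [pvOut_length]; exact hi
    have hiOle : i ≤ (pvOut delta flag).length := le_of_lt hiO
    rw [List.range_succ, List.foldl_append, heq, List.foldl_cons, List.foldl_nil]
    have hflagi : (PySem.List.pyGet? flag (i : Int)).getD false = pvFlag flag i := by
      rw [PySem.List.pyGet?_natCast]; rfl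
    -- the value A reads as delta_n[i] (still untouched)
    have hdn_i : (((pvOut delta flag).take i ++ delta.drop i))[i]?.getD 0 = delta[i]'hi := by
      rw [pv_mixed_eq (pvOut delta flag) delta i hiOle hi, List.getElem?_eq_getElem hi]; rfl
    have hdn : (PySem.List.pyGet? ((pvOut delta flag).take i ++ delta.drop i) (i : Int)).getD 0
        = delta[i]'hi := by
      rw [PySem.List.pyGet?_natCast, pv_mixed_eq (pvOut delta flag) delta i hiOle hi,
        List.getElem?_eq_getElem hi]
      rfl
    by_cases hf : pvFlag flag i = true
    · -- flag[i] is True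
      rw [hflagi, if_pos hf]
      have hsplit : i = 0 ∨ ∃ j, i = j + 1 := by
        cases i with
        | zero => exact Or.inl rfl
        | succ j => exact Or.inr ⟨j, rfl⟩
      rcases hsplit with rfl | ⟨i', rfl⟩
      · -- i = 0: leading run, position 0 is zeroed whatever flag[-1] is
        have hO0 : (pvOut delta flag)[0]'hiO = 0 := by
          rw [pvOut_getElem delta flag 0 hi, if_pos hf]
          show pvFill delta (pvRunStart flag 0) = 0
          rw [show pvRunStart flag 0 = 0 from rfl, pvFill, if_neg (by omega)]
        have hset : ((pvOut delta flag).take 0 ++ delta.drop 0).set 0 (0 : Int)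
            = (pvOut delta flag).take 1 ++ delta.drop 1 :=
          pv_step_set (pvOut delta flag) delta 0 hiO hi 0 hO0
        by_cases hc2 : (PySem.List.pyGet? flag (((0 : Nat) : Int) - 1)).getD false = false
        · refine ⟨((0 : Nat) : Int), ?_, fun h => absurd h (by omega), ?_⟩
          · simp only [if_pos hc2]
            rw [if_neg (by omega), hset]
          · intro i'' h hf''
            have : i'' = 0 := by omega
            subst this
            exact Or.inr ⟨rfl, by omega⟩
        · have hm0 : maker = -1 := h0 rfl
          refine ⟨maker, ?_, fun h => absurd h (by omega), ?_⟩
          · simp only [if_neg hc2]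
            rw [if_neg (by omega), hset]
          · intro i'' h hf''
            have : i'' = 0 := by omega
            subst this
            exact Or.inr ⟨rfl, by omega⟩
      · -- i = i' + 1
        have hc2eq : (PySem.List.pyGet? flag ((((i' + 1 : Nat)) : Int) - 1)).getD false
            = pvFlag flag i' := by
          rw [show (((i' + 1 : Nat)) : Int) - 1 = ((i' : Nat) : Int) by push_cast; ring,
            PySem.List.pyGet?_natCast]
          rfl
        by_cases hf' : pvFlag flag i' = true
        · -- run continues: maker carried over
          have hc2 : ¬ ((PySem.List.pyGet? flag ((((i' + 1 : Nat)) : Int) - 1)).getD false = false) := by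
            rw [hc2eq, hf']; simp
          have hrseq : pvRunStart flag (i' + 1) = pvRunStart flag i' :=
            pvRunStart_succ_true flag i' hf'
          rcases hmk i' rfl hf' with hD1 | ⟨hs0, hmle⟩
          · -- maker = runStart
            have hsle : pvRunStart flag i' ≤ i' := pvRunStart_le flag i'
            have hsn : pvRunStart flag i' < delta.length := by omega
            have hsO : pvRunStart flag i' < (pvOut delta flag).length := by
              rw [pvOut_length]; omega
            have hfixs := pvRunStart_fix flag i' hf'
            have hOs : (pvOut delta flag)[pvRunStart flag i']'hsO = pvFill delta (pvRunStart flag i') := by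
              rw [pvOut_getElem delta flag _ hsn, if_pos hfixs.1, hfixs.2]
            have hOi : (pvOut delta flag)[i' + 1]'hiO = pvFill delta (pvRunStart flag i') := by
              rw [pvOut_getElem delta flag (i' + 1) hi, if_pos hf, hrseq]
            by_cases hcond : 10 ≤ ((pvRunStart flag i' : Nat) : Int) ∧
                ((pvRunStart flag i' : Nat) : Int) ≤ (delta.length : Int) - 10
            · have hget : (PySem.List.pyGet?
                  ((pvOut delta flag).take (i' + 1) ++ delta.drop (i' + 1)) maker).getD 0
                  = pvFill delta (pvRunStart flag i') := by
                rw [hD1, PySem.List.pyGet?_natCast,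
                  pv_mixed_lt (pvOut delta flag) delta (i' + 1) _ (by omega) hiOle,
                  List.getElem?_eq_getElem hsO]
                simpa using hOs
              refine ⟨maker, ?_, fun h => absurd h (by omega), ?_⟩
              · simp only [if_neg hc2]
                rw [if_pos (by rw [hD1]; exact hcond), hget,
                  pv_step_set (pvOut delta flag) delta (i' + 1) hiO hi _ hOi]
              · intro i'' h hf''
                have : i'' = i' + 1 := by omega
                subst this
                exact Or.inl (by rw [hrseq]; exact hD1)
            · have hOi0 : (pvOut delta flag)[i' + 1]'hiO = 0 := by
                rw [hOi, pvFill, if_neg hcond]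
              refine ⟨maker, ?_, fun h => absurd h (by omega), ?_⟩
              · simp only [if_neg hc2]
                rw [if_neg (by rw [hD1]; exact hcond),
                  pv_step_set (pvOut delta flag) delta (i' + 1) hiO hi 0 hOi0]
              · intro i'' h hf''
                have : i'' = i' + 1 := by omega
                subst this
                exact Or.inl (by rw [hrseq]; exact hD1)
          · -- leading run (runStart = 0): maker stays ≤ 0, position zeroed
            have hOi0 : (pvOut delta flag)[i' + 1]'hiO = 0 := by
              rw [pvOut_getElem delta flag (i' + 1) hi, if_pos hf, hrseq, hs0, pvFill,
                if_neg (by omega)]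
            refine ⟨maker, ?_, fun h => absurd h (by omega), ?_⟩
            · simp only [if_neg hc2]
              rw [if_neg (by omega),
                pv_step_set (pvOut delta flag) delta (i' + 1) hiO hi 0 hOi0]
            · intro i'' h hf''
              have : i'' = i' + 1 := by omega
              subst this
              exact Or.inr ⟨by rw [hrseq]; exact hs0, hmle⟩
        · -- a new run starts at i' + 1
          have hc2 : (PySem.List.pyGet? flag ((((i' + 1 : Nat)) : Int) - 1)).getD false = false := by
            rw [hc2eq]; simpa using hf'
          have hrseq : pvRunStart flag (i' + 1) = i' + 1 :=
            pvRunStart_succ_false flag i' hf'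
          by_cases hcond : 10 ≤ (((i' + 1 : Nat)) : Int) ∧
              (((i' + 1 : Nat)) : Int) ≤ (delta.length : Int) - 10
          · have hOi : (pvOut delta flag)[i' + 1]'hiO = delta[i' + 1]'hi := by
              rw [pvOut_getElem delta flag (i' + 1) hi, if_pos hf, hrseq, pvFill, if_pos hcond]
              simp [List.getD, List.getElem?_eq_getElem hi]
            refine ⟨(((i' + 1 : Nat)) : Int), ?_, fun h => absurd h (by omega), ?_⟩
            · simp only [if_pos hc2]
              rw [if_pos hcond, hdn,
                pv_step_set (pvOut delta flag) delta (i' + 1) hiO hi _ hOi]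
            · intro i'' h hf''
              have : i'' = i' + 1 := by omega
              subst this
              exact Or.inl (by rw [hrseq])
          · have hOi0 : (pvOut delta flag)[i' + 1]'hiO = 0 := by
              rw [pvOut_getElem delta flag (i' + 1) hi, if_pos hf, hrseq, pvFill, if_neg hcond]
            refine ⟨(((i' + 1 : Nat)) : Int), ?_, fun h => absurd h (by omega), ?_⟩
            · simp only [if_pos hc2]
              rw [if_neg hcond,
                pv_step_set (pvOut delta flag) delta (i' + 1) hiO hi 0 hOi0]
            · intro i'' h hf''
              have : i'' = i' + 1 := by omega
              subst this
              exact Or.inl (by rw [hrseq])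
    · -- flag[i] is False: state unchanged, frontier advances
      rw [hflagi, if_neg hf]
      have hv : (pvOut delta flag)[i]'hiO = delta[i]'hi := by
        rw [pvOut_getElem delta flag i hi, if_neg hf]
        simp [List.getD, List.getElem?_eq_getElem hi]
      refine ⟨maker, ?_, fun h => absurd h (by omega), ?_⟩
      · rw [pv_step_skip (pvOut delta flag) delta i hiO hi hv]
      · intro i' h hf'
        have : i = i' := by omega
        subst this
        exact absurd hf' (by simp [hf])

theorem pvA_eq (delta : List Int) (flag : List Bool) (mask : List Int)
    (hpre : Pre_delta_update delta flag mask) :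
    delta_update delta flag mask = pvOut delta flag := by
  rcases hpre with h | h
  · subst h; rfl
  · obtain ⟨maker, heq, -, -⟩ := pvA_inv delta flag h delta.length (le_refl _)
    unfold delta_update
    rw [heq]
    rw [List.take_of_length_le (by rw [pvOut_length]), List.drop_length, List.append_nil]

-- ===== B-side =====

-- stage 1 after the first i iterations
def pvGroupsAux (flag : List Bool) (i : Nat) : List (Bool × Nat × Nat) :=
  (List.range i).foldl (fun (gs : List (Bool × Nat × Nat)) (i : Nat) =>
    match gs.getLast? with
    | some g =>
      if g.1 = pvFlag flag i then gs.dropLast ++ [(g.1, g.2.1, g.2.2 + 1)]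
      else gs ++ [(pvFlag flag i, i, 1)]
    | none => gs ++ [(pvFlag flag i, i, 1)]) []

-- the stage-2 fold is a flatMap
theorem pv_foldl_append {α β : Type} (f : α → List β) (gs : List α) (acc : List β) :
    gs.foldl (fun out g => out ++ f g) acc = acc ++ gs.flatMap f := by
  induction gs generalizing acc with
  | nil => simp
  | cons g gs ih => simp [List.foldl_cons, ih]

theorem pvSeg_true (delta : List Int) (s l : Nat) :
    pvSeg delta (true, s, l) = List.replicate l (pvFill delta s) := by
  simp [pvSeg, pvFill]

theorem pvSeg_false (delta : List Int) (s l : Nat) :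
    pvSeg delta (false, s, l) = (delta.drop s).take l := by
  simp [pvSeg, PySem.List.slice_natCast_add]

theorem pvB_inv (delta : List Int) (flag : List Bool) :
    ∀ i, i ≤ delta.length →
      ((pvGroupsAux flag i).flatMap (pvSeg delta) = (pvOut delta flag).take i)
      ∧ (i = 0 → pvGroupsAux flag i = [])
      ∧ (∀ i', i = i' + 1 → ∃ gs' v s l, pvGroupsAux flag i = gs' ++ [(v, s, l)]
            ∧ s + l = i ∧ 1 ≤ l ∧ v = pvFlag flag i'
            ∧ (v = true → pvRunStart flag i' = s)) := by
  intro i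
  induction i with
  | zero =>
    intro _
    exact ⟨by simp [pvGroupsAux, pvOut], fun _ => rfl, fun i' h => absurd h (by omega)⟩
  | succ i ih =>
    intro hle
    obtain ⟨hcat, h0, hlast⟩ := ih (by omega)
    have hi : i < delta.length := by omega
    have hiO : i < (pvOut delta flag).length := by rw [pvOut_length]; exact hi
    have hstep : pvGroupsAux flag (i + 1)
        = (match (pvGroupsAux flag i).getLast? with
          | some g =>
            if g.1 = pvFlag flag i then
              (pvGroupsAux flag i).dropLast ++ [(g.1, g.2.1, g.2.2 + 1)]
            else pvGroupsAux flag i ++ [(pvFlag flag i, i, 1)]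
          | none => pvGroupsAux flag i ++ [(pvFlag flag i, i, 1)]) := by
      simp only [pvGroupsAux]
      rw [List.range_succ, List.foldl_append, List.foldl_cons, List.foldl_nil]
    have htake : (pvOut delta flag).take (i + 1)
        = (pvOut delta flag).take i ++ [(pvOut delta flag)[i]'hiO] := by
      rw [List.take_add_one, List.getElem?_eq_getElem hiO]
      rfl
    have hgetD : delta.getD i 0 = delta[i]'hi := by
      simp [List.getD, List.getElem?_eq_getElem hi]
    have hsplit : i = 0 ∨ ∃ j, i = j + 1 := by
      cases i with
      | zero => exact Or.inl rfl
      | succ j => exact Or.inr ⟨j, rfl⟩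
    rcases hsplit with rfl | ⟨i', rfl⟩
    · -- first iteration: a fresh group [(flag[0], 0, 1)]
      have hnil : pvGroupsAux flag 0 = [] := rfl
      have hnew : pvGroupsAux flag 1 = [(pvFlag flag 0, 0, 1)] := by
        rw [hstep, hnil]
        rfl
      have hseg : pvSeg delta (pvFlag flag 0, 0, 1) = [(pvOut delta flag)[0]'hiO] := by
        cases hf0 : pvFlag flag 0 with
        | true =>
          rw [pvSeg_true, pvOut_getElem delta flag 0 hi, if_pos hf0]
          rfl
        | false =>
          rw [pvSeg_false, pvOut_getElem delta flag 0 hi, if_neg (by simp [hf0]), hgetD]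
          rw [List.drop_zero, List.take_add_one, List.take_zero, List.getElem?_eq_getElem hi]
          rfl
      refine ⟨?_, fun h => absurd h (by omega), ?_⟩
      · rw [hnew, htake]
        simp [hseg]
      · intro i'' h
        have : i'' = 0 := by omega
        subst this
        exact ⟨[], pvFlag flag 0, 0, 1, hnew, rfl, le_refl 1, rfl, fun _ => rfl⟩
    · -- i = i' + 1: the previous group ends at i
      obtain ⟨gs', v, s, l, hgs, hsl, hl1, hv, hrs⟩ := hlast i' rfl
      have hlastg : (pvGroupsAux flag (i' + 1)).getLast? = some (v, s, l) := by
        rw [hgs, List.getLast?_concat]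
      have hdrop : (pvGroupsAux flag (i' + 1)).dropLast = gs' := by
        rw [hgs, List.dropLast_concat]
      by_cases hveq : v = pvFlag flag (i' + 1)
      · -- run continues: extend the last group
        have hnew : pvGroupsAux flag (i' + 1 + 1) = gs' ++ [(v, s, l + 1)] := by
          rw [hstep, hlastg]
          simp only [if_pos hveq, hdrop]
        have hsegext : pvSeg delta (v, s, l + 1)
            = pvSeg delta (v, s, l) ++ [(pvOut delta flag)[i' + 1]'hiO] := by
          cases hvv : v with
          | true =>
            have hfi : pvFlag flag (i' + 1) = true := by rw [← hveq, hvv]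
            have hfi' : pvFlag flag i' = true := by rw [← hv, hvv]
            have hrsi : pvRunStart flag (i' + 1) = s := by
              rw [pvRunStart_succ_true flag i' hfi', hrs (by rw [hvv])]
            rw [pvSeg_true, pvSeg_true, pvOut_getElem delta flag (i' + 1) hi, if_pos hfi,
              hrsi, List.replicate_succ']
          | false =>
            have hfi : pvFlag flag (i' + 1) = false := by rw [← hveq, hvv]
            rw [pvSeg_false, pvSeg_false, pvOut_getElem delta flag (i' + 1) hi,
              if_neg (by simp [hfi]), hgetD]
            rw [List.take_add_one, List.getElem?_drop,
              show s + l = i' + 1 from hsl, List.getElem?_eq_getElem hi]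
            rfl
        refine ⟨?_, fun h => absurd h (by omega), ?_⟩
        · rw [hnew, htake, ← hcat, hgs]
          simp [hsegext]
        · intro i'' h
          have : i'' = i' + 1 := by omega
          subst this
          refine ⟨gs', v, s, l + 1, hnew, by omega, by omega, hveq, ?_⟩
          intro hvv
          have hfi' : pvFlag flag i' = true := by rw [← hv, hvv]
          rw [pvRunStart_succ_true flag i' hfi', hrs hvv]
      · -- flag changed: start a new group at i
        have hnew : pvGroupsAux flag (i' + 1 + 1)
            = pvGroupsAux flag (i' + 1) ++ [(pvFlag flag (i' + 1), i' + 1, 1)] := by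
          rw [hstep, hlastg]
          simp only [if_neg hveq]
        have hrsnew : pvFlag flag (i' + 1) = true → pvRunStart flag (i' + 1) = i' + 1 := by
          intro hfi
          have hfi' : ¬ pvFlag flag i' = true := by
            rw [← hv]
            intro hvv
            exact hveq (by rw [hvv, hfi])
          exact pvRunStart_succ_false flag i' hfi'
        have hseg : pvSeg delta (pvFlag flag (i' + 1), i' + 1, 1)
            = [(pvOut delta flag)[i' + 1]'hiO] := by
          cases hfi : pvFlag flag (i' + 1) with
          | true =>
            rw [pvSeg_true, pvOut_getElem delta flag (i' + 1) hi, if_pos hfi, hrsnew hfi]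
            rfl
          | false =>
            rw [pvSeg_false, pvOut_getElem delta flag (i' + 1) hi, if_neg (by simp [hfi]), hgetD]
            simp [List.take_add_one, List.getElem?_drop, List.getElem?_eq_getElem hi]
        refine ⟨?_, fun h => absurd h (by omega), ?_⟩
        · rw [hnew, htake]
          simp [List.flatMap_append, hcat, hseg]
        · intro i'' h
          have : i'' = i' + 1 := by omega
          subst this
          exact ⟨pvGroupsAux flag (i' + 1), pvFlag flag (i' + 1), i' + 1, 1, hnew, rfl,
            le_refl 1, rfl, hrsnew⟩

theorem pvB_eq (delta : List Int) (flag : List Bool) (mask : List Int) :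
    delta_update_alt delta flag mask = pvOut delta flag := by
  have h := (pvB_inv delta flag delta.length (le_refl _)).1
  unfold delta_update_alt
  rw [show pvGroups flag delta.length = pvGroupsAux flag delta.length from rfl,
    pv_foldl_append, h, List.take_of_length_le (by rw [pvOut_length])]
  simp

-- ===== VERDICT (by name: the statement is the Claim_ definition above) =====
theorem delta_update_spec : Claim_equal_delta_update := by
  intro delta flag mask _ hpre
  unfold Spec_delta_update
  rw [pvA_eq delta flag mask hpre, pvB_eq]
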